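-- pv_equiv track=rewrite | github.com/Pritz69/GFG_POTD | Easy/Minimum Operations/minimum-operations.py | minOperation
-- ===== SOURCE A (Python) =====
-- def minOperation(n):
--     # code here
--     c=0
--     while n != 0 :
--         if n%2==0 :
--             n = n//2
--         else :
--             n -=1
--         c +=1
--     return c
-- ===== SOURCE B (Python) =====
-- def minOperation(n):
--     if n == 0:
--         return 0
--     return n.bit_length() - 1 + bin(n).count('1')
-- ===== Notes on version B (the rewrite author's own statement) =====
-- stated objective: simpler
-- what changed: Replaces the halve/decrement loop with a closed form read off the binary representation: bit_length(n)-1 halvings plus popcount(n) decrements.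
-- outside the precondition, e.g. on minOperation(-1): A does not finish within the time limit, B returns 1
import Mathlib
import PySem

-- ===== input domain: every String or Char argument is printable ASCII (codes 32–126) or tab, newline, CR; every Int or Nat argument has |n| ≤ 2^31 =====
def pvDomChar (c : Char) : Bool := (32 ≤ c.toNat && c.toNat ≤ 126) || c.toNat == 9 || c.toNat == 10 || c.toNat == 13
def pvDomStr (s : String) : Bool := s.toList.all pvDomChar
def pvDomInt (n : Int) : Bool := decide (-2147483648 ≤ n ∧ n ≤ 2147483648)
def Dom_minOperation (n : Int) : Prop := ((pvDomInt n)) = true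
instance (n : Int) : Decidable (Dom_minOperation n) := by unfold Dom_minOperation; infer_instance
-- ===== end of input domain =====

-- B replaces A's halve/decrement loop with a closed form read off the binary
-- representation (bit_length − 1 halvings plus popcount decrements); equal on n ≥ 0.

-- ===== PORT A =====
-- A's while loop, step for step, as recursion on (n, c); the Nat fuel only makes the
-- recursion total (fuel = n.toNat + 1 suffices since every iteration decreases n when
-- n > 0; Python A loops forever for n < 0 — excluded by Pre_).
def minOpGo : Nat → Int → Int → Int
  | 0, _, c => c
  | fuel + 1, n, c =>
    if n = 0 then c
    else if PySem.Int.mod n 2 = 0 then minOpGo fuel (PySem.Int.floordiv n 2) (c + 1)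
    else minOpGo fuel (n - 1) (c + 1)

def minOperation (n : Int) : Int := minOpGo (n.toNat + 1) n 0

-- ===== PORT B =====
def minOperation_alt (n : Int) : Int :=
  if n = 0 then 0
  else ((PySem.Int.bitLength n : Int) - 1) + (PySem.Int.bitCount n : Int)

-- ===== PRECONDITION & SPEC =====
-- Pre_ excludes n < 0, on which Python A loops forever (no value returned).
def Pre_minOperation (n : Int) : Prop := 0 ≤ n
instance (n : Int) : Decidable (Pre_minOperation n) := by unfold Pre_minOperation; infer_instance
def pvWitness_minOperation : Int := 6

def Spec_minOperation (n : Int) (out : Int) : Prop := out = minOperation_alt n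
instance (n : Int) (out : Int) : Decidable (Spec_minOperation n out) := by unfold Spec_minOperation; infer_instance

-- ===== CLAIM =====
def Claim_equal_minOperation : Prop :=
  ∀ (n : Int), Dom_minOperation n → Pre_minOperation n → Spec_minOperation n (minOperation n)

-- ===== LEMMAS AND PROOFS =====
theorem minOpGo_closed (fuel : Nat) (n : Int) (hn : 0 ≤ n) (hf : n.toNat < fuel) (c : Int) :
    minOpGo fuel n c
      = c + (if n = 0 then 0
             else ((PySem.Int.bitLength n : Int) - 1) + (PySem.Int.bitCount n : Int)) := by
  induction fuel generalizing n c with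
  | zero => omega
  | succ fuel ih =>
    by_cases h0 : n = 0
    · subst h0; simp [minOpGo]
    · have hpos : 0 < n := by omega
      have hfd_lt : PySem.Int.floordiv n 2 < n :=
        (PySem.Int.floordiv_lt_iff_lt_mul (by omega)).mpr (by omega)
      have hfd_nonneg : 0 ≤ PySem.Int.floordiv n 2 :=
        (PySem.Int.le_floordiv_iff_mul_le (by omega)).mpr (by omega)
      have hBL := PySem.Int.bitLength_of_pos hpos
      have hBC := PySem.Int.bitCount_of_pos hpos
      rw [minOpGo, if_neg h0]
      by_cases he : PySem.Int.mod n 2 = 0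
      · rw [if_pos he, ih _ hfd_nonneg (by omega) (c + 1)]
        by_cases hz : PySem.Int.floordiv n 2 = 0
        · have := PySem.Int.floordiv_mul_add_mod n 2
          rw [hz, he] at this
          omega
        · rw [if_neg hz, if_neg h0, hBL, hBC, he]
          push_cast
          omega
      · rw [if_neg he]
        have hm := PySem.Int.mod_nonneg (a := n) (b := 2) (by omega)
        have hmlt := PySem.Int.mod_lt (a := n) (b := 2) (by omega)
        have hm1 : PySem.Int.mod n 2 = 1 := by omega
        have heq := PySem.Int.floordiv_mul_add_mod n 2
        rw [ih (n - 1) (by omega) (by omega) (c + 1), if_neg h0]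
        by_cases h1 : n = 1
        · subst h1
          have hL : PySem.Int.bitLength 1 = 1 := by decide
          have hC : PySem.Int.bitCount 1 = 1 := by decide
          simp [hL, hC]
        · rw [if_neg (by omega : ¬ (n - 1 = 0))]
          have hpos' : (0:Int) < n - 1 := by omega
          have hBL' := PySem.Int.bitLength_of_pos hpos'
          have hBC' := PySem.Int.bitCount_of_pos hpos'
          have hfd' : PySem.Int.floordiv (n - 1) 2 = PySem.Int.floordiv n 2 :=
            (PySem.Int.floordiv_eq_iff_of_pos (by omega)).mpr (by omega)
          have hm' : PySem.Int.mod (n - 1) 2 = 0 := by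
            have h2 := PySem.Int.floordiv_mul_add_mod (n - 1) 2
            have hnn := PySem.Int.mod_nonneg (a := n - 1) (b := 2) (by omega)
            have hlt := PySem.Int.mod_lt (a := n - 1) (b := 2) (by omega)
            rw [hfd'] at h2
            omega
          rw [hBL, hBC, hBL', hBC', hfd', hm', hm1]
          push_cast
          omega

-- ===== VERDICT =====
theorem minOperation_spec : Claim_equal_minOperation := by
  intro n _ hpre
  unfold Spec_minOperation minOperation minOperation_alt
  rw [minOpGo_closed (n.toNat + 1) n hpre (by omega) 0]
  simp
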